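-- pv_equiv track=rewrite | github.com/schloi/MARVEL | hic/scripts/contacts_scaffold_relative.py | process_mtree
-- ===== SOURCE A (Python) =====
-- class node(object):
--     def __init__(self, level, rc, length):
--         self.rc = rc
--         self.length = length
--         self.childs = []
--         self.level = level
--
--     def __str__(self):
--         output = "{} {} {} {}".format(self.level, self.rc, self.length, len(self.childs))
--
--         for c in self.childs:
--             output += "\n" + "  " * c.level + str(c)
--
--         return output
--
--     def leaf(self):
--         return ( len(self.childs) == 0 )
--
-- def traverse(root, offlevel, output, rc):
--     output.append( (root.level, root.rc, offlevel, offlevel + root.length) )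
--
--     if root.leaf():
--         return offlevel + root.length
--
--     if rc:
--         if root.rc:
--             thisrc = False
--         else:
--             thisrc = True
--     else:
--         if root.rc:
--             thisrc = True
--         else:
--             thisrc = False
--
--     if thisrc: # if root.rc:
--         for n in reversed( root.childs ):
--             offlevel = traverse(n, offlevel, output, thisrc)
--     else:
--         for n in root.childs:
--             offlevel = traverse(n, offlevel, output, thisrc)
--
--     return offlevel
--
-- def process_mtree(mtree):
--
--     if len(mtree) == 0:
--         return []
--
--     root = node( *mtree[0] )
--     stack = [ root ]
--
--     for (level, rc, length) in mtree[1:]: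
--         if root.level + 1 != level:
--             assert( level <= root.level )
--
--             while level <= root.level:
--                 root = stack.pop()
--
--         root.childs.append( node( level, rc, length ) )
--         stack.append(root)
--
--         root = root.childs[-1]
--
--     output = []
--     traverse(stack[0], 0, output, False)
--
--     return output
-- ===== SOURCE B (Python) =====
-- def process_mtree(mtree):
--     if not mtree:
--         return []
--
--     n = len(mtree)
--
--     # recursive-descent parse: node i's subtree = following entries with level > its own
--     def parse(i):
--         level, rc, length = mtree[i]
--         childs = []
--         j = i + 1
--         while j < n and mtree[j][0] > level:
--             child, j = parse(j)
--             childs.append(child)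
--         return (level, rc, length, childs), j
--
--     root, _ = parse(0)
--
--     # iterative pre-order walk with an explicit stack and a running leaf offset
--     out = []
--     offset = 0
--     todo = [(root, False)]
--     while todo:
--         (level, rc, length, childs), flag = todo.pop()
--         out.append((level, rc, offset, offset + length))
--         if not childs:
--             offset += length
--         else:
--             childrc = flag != rc
--             for c in (childs if childrc else reversed(childs)):
--                 todo.append((c, childrc))
--     return out
-- ===== Notes on version B (the rewrite author's own statement) =====
-- stated objective: alternative
-- what changed: The mutation-based stack build of linked node objects is replaced by a recursive-descent parse of the level list, and the recursive traverse is replaced by an iterative pre-order walk over an explicit (node, flag) stack with a single running leaf offset.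
import Mathlib
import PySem

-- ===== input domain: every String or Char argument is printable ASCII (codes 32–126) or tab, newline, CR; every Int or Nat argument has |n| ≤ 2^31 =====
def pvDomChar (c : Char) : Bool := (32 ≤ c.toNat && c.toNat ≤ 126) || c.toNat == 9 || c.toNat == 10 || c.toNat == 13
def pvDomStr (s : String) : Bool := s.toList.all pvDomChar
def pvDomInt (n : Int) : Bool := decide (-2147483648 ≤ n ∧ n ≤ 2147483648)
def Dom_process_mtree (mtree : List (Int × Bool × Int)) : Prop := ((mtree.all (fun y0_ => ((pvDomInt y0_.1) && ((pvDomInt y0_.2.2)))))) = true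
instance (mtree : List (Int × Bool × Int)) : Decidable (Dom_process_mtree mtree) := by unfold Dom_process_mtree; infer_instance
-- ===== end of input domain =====

-- B replaces A's mutating stack-of-aliased-nodes build by a recursive-descent parse of the
-- level list and A's recursive traverse by an iterative explicit-stack pre-order walk
-- (objective: alternative decomposition, same O(n) cost).

-- ===== PORT A =====
-- Rose trees encoded sibling-style (single inductive): `node level rc length kids nextSibling`.
-- A Python child list is the `kids` chain read along the `next` pointers.
inductive RT
  | nil : RT
  | node : Int → Bool → Int → RT → RT → RT
deriving DecidableEq, Repr

def rtSize : RT → Nat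
  | .nil => 0
  | .node _ _ _ kids next => 1 + rtSize kids + rtSize next

-- list reversal on a sibling chain (Python's reversed(childs)), accumulator style
def revRT : RT → RT → RT
  | .nil, acc => acc
  | .node l rc len kids next, acc => revRT next (.node l rc len kids acc)

-- chain concatenation (Python's childs.append works at the end of the list)
def appendRT : RT → RT → RT
  | .nil, t => t
  | .node l rc len kids next, t => .node l rc len kids (appendRT next t)

-- needed by travA's termination proof, hence stated above it
theorem rtSize_revRT (t acc : RT) : rtSize (revRT t acc) = rtSize t + rtSize acc := by
  induction t generalizing acc with
  | nil => simp [revRT, rtSize]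
  | node l rc len kids next ih1 ih2 => rw [revRT, ih2]; simp [rtSize]; omega

-- Python A mutates `node` objects through aliases held in `stack`; we model the object graph
-- exactly as a zipper: `cur` is the node currently being extended (level, rc, length, children
-- built so far) and `anc` the chain of its ancestors, each with the children built so far.
-- `frameClose` is what Python's earlier `childs.append` becomes observable as when we move up.
def frameClose (parent child : Int × Bool × Int × RT) : Int × Bool × Int × RT :=
  (parent.1, parent.2.1, parent.2.2.1,
    appendRT parent.2.2.2 (RT.node child.1 child.2.1 child.2.2.1 child.2.2.2 RT.nil))

-- `while level <= root.level: root = stack.pop()`; Python raises IndexError on an empty stack,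
-- those inputs are excluded by Pre_process_mtree (here we just stop).
def popWhileA (lvl : Int) (cur : Int × Bool × Int × RT) :
    List (Int × Bool × Int × RT) → (Int × Bool × Int × RT) × List (Int × Bool × Int × RT)
  | [] => (cur, [])
  | f :: rest =>
    if lvl ≤ cur.1 then popWhileA lvl (frameClose f cur) rest else (cur, f :: rest)

-- the `for (level, rc, length) in mtree[1:]` loop
def buildLoopA (cur : Int × Bool × Int × RT) (anc : List (Int × Bool × Int × RT)) :
    List (Int × Bool × Int) → (Int × Bool × Int × RT) × List (Int × Bool × Int × RT)
  | [] => (cur, anc)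
  | (l, rc, len) :: rest =>
    let s := if cur.1 + 1 ≠ l then popWhileA l cur anc else (cur, anc)
    buildLoopA (l, rc, len, RT.nil) (s.1 :: s.2) rest

-- Python's stack[0] is the bottom node object after all mutations: collapse the whole zipper
def closeAllA (cur : Int × Bool × Int × RT) :
    List (Int × Bool × Int × RT) → Int × Bool × Int × RT
  | [] => cur
  | f :: rest => closeAllA (frameClose f cur) rest

-- `traverse`: emits the node, leaves advance the offset, inner nodes recurse over the
-- (possibly reversed) child list; the Python for-loop over childs is the walk along `next`.
def travA (t : RT) (flag : Bool) (off : Int) (out : List (Int × Bool × Int × Int)) :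
    Int × List (Int × Bool × Int × Int) :=
  match t with
  | .nil => (off, out)
  | .node l rc len kids next =>
    let out1 := out ++ [(l, rc, off, off + len)]
    let s :=
      if kids = RT.nil then (off + len, out1)
      else
        let thisrc := if flag then (if rc then false else true) else (if rc then true else false)
        travA (if thisrc then revRT kids RT.nil else kids) thisrc off out1
    travA next flag s.1 s.2
termination_by rtSize t
decreasing_by
  all_goals cases flag <;> cases rc <;> simp [rtSize, rtSize_revRT] <;> omega

def process_mtree (mtree : List (Int × Bool × Int)) : List (Int × Bool × Int × Int) :=
  match mtree with
  | [] => []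
  | (l0, rc0, len0) :: rest =>
    let s := buildLoopA (l0, rc0, len0, RT.nil) [] rest
    let rootF := closeAllA s.1 s.2
    (travA (RT.node rootF.1 rootF.2.1 rootF.2.2.1 rootF.2.2.2 RT.nil) false 0 []).2

-- ===== PORT B =====
-- recursive-descent parse (Source B's `parse`): consume successive entries while their level is
-- above `lvl`, each consumed entry recursively takes its own subtree; the index `j` of the
-- Python code becomes the returned rest-of-list.  The fuel only guards termination; any
-- fuel > length of the list gives the parse Source B performs.
def parseSibs : Nat → Int → List (Int × Bool × Int) → RT × List (Int × Bool × Int)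
  | 0, _, xs => (RT.nil, xs)
  | _ + 1, _, [] => (RT.nil, [])
  | f + 1, lvl, (l, rc, len) :: rest =>
    if lvl < l then
      let k := parseSibs f l rest
      let s := parseSibs f lvl k.2
      (RT.node l rc len k.1 s.1, s.2)
    else (RT.nil, (l, rc, len) :: rest)

-- `for c in …: todo.append((c, childrc))` — later appends sit higher on the stack
def pushKids (c : Bool) : RT → List (RT × Bool) → List (RT × Bool)
  | .nil, td => td
  | .node l rc len kids next, td => pushKids c next ((RT.node l rc len kids next, c) :: td)

-- the `while todo:` loop; fuel = one unit per popped node, any fuel ≥ node count is exact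
def todoLoop : Nat → List (RT × Bool) → Int → List (Int × Bool × Int × Int) →
    Int × List (Int × Bool × Int × Int)
  | _, [], off, out => (off, out)
  | 0, _ :: _, off, out => (off, out)
  | f + 1, (t, flag) :: rest, off, out =>
    match t with
    | .nil => todoLoop f rest off out   -- never pushed; harmless catch-all
    | .node l rc len kids _ =>
      let out1 := out ++ [(l, rc, off, off + len)]
      if kids = RT.nil then todoLoop f rest (off + len) out1
      else todoLoop f
        (pushKids (flag != rc) (if flag != rc then kids else revRT kids RT.nil) rest) off out1

def process_mtree_alt (mtree : List (Int × Bool × Int)) : List (Int × Bool × Int × Int) :=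
  match mtree with
  | [] => []
  | (l0, rc0, len0) :: rest =>
    let root := RT.node l0 rc0 len0 (parseSibs mtree.length l0 rest).1 RT.nil
    (todoLoop mtree.length [(root, false)] 0 []).2

-- ===== PRECONDITION & SPEC =====
-- Pre_ is exactly A's no-exception set: each level may rise by at most one step
-- (else the assert fires) and every later level stays above the first entry's level
-- (else the stack is popped empty, IndexError).
def Pre_process_mtree (mtree : List (Int × Bool × Int)) : Prop :=
  (∀ p ∈ (mtree.map Prod.fst).zip (mtree.map Prod.fst).tail, p.2 ≤ p.1 + 1) ∧
  ∀ x ∈ mtree.head?.toList, ∀ e ∈ mtree.tail, x.1 < e.1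

instance (mtree : List (Int × Bool × Int)) : Decidable (Pre_process_mtree mtree) := by
  unfold Pre_process_mtree; infer_instance

def pvWitness_process_mtree : (List (Int × Bool × Int)) :=
  [(0, false, 2), (1, true, 1), (2, false, 4), (1, false, 3)]

def Spec_process_mtree (mtree : List (Int × Bool × Int)) (out : List (Int × Bool × Int × Int)) : Prop := out = process_mtree_alt mtree
instance (mtree : List (Int × Bool × Int)) (out : List (Int × Bool × Int × Int)) : Decidable (Spec_process_mtree mtree out) := by unfold Spec_process_mtree; infer_instance

-- ===== CLAIM (what is proved, stated in full; the proofs are below) =====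
def Claim_equal_process_mtree : Prop := ∀ (mtree : List (Int × Bool × Int)), Dom_process_mtree mtree → Pre_process_mtree mtree → Spec_process_mtree mtree (process_mtree mtree)

-- ===== LEMMAS AND PROOFS =====

theorem appendRT_nil (t : RT) : appendRT t RT.nil = t := by
  induction t with
  | nil => rfl
  | node l rc len kids next ih1 ih2 => simp [appendRT, ih2]

theorem appendRT_assoc (a b c : RT) :
    appendRT (appendRT a b) c = appendRT a (appendRT b c) := by
  induction a with
  | nil => rfl
  | node l rc len kids next ih1 ih2 => simp [appendRT, ih2]

-- detach a node from its following siblings (todo entries are used fieldwise in Python;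
-- the ignored sibling pointer is normalised away in the reference run)
def detachRT : RT → RT
  | .nil => RT.nil
  | .node l rc len kids _ => RT.node l rc len kids RT.nil

-- reference run: process the todo entries in order, each by A's recursive traverse
def specRun : List (RT × Bool) → Int → List (Int × Bool × Int × Int) →
    Int × List (Int × Bool × Int × Int)
  | [], off, out => (off, out)
  | (t, c) :: rest, off, out =>
    let s := travA (detachRT t) c off out
    specRun rest s.1 s.2

-- the chain's nodes (detached), in sibling order, each tagged with the flag
def chainEnts (c : Bool) : RT → List (RT × Bool)
  | .nil => []
  | .node l rc len kids next => (RT.node l rc len kids RT.nil, c) :: chainEnts c next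

def cntTd (td : List (RT × Bool)) : Nat :=
  (td.map (fun p => rtSize (detachRT p.1))).sum

theorem specRun_append (a b : List (RT × Bool)) (off : Int)
    (out : List (Int × Bool × Int × Int)) :
    specRun (a ++ b) off out = specRun b (specRun a off out).1 (specRun a off out).2 := by
  induction a generalizing off out with
  | nil => rfl
  | cons p rest ih => obtain ⟨t, c⟩ := p; simp [specRun, ih]

theorem chainEnts_revRT (c : Bool) (t acc : RT) :
    chainEnts c (revRT t acc) = (chainEnts c t).reverse ++ chainEnts c acc := by
  induction t generalizing acc with
  | nil => simp [revRT, chainEnts]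
  | node l rc len kids next ih1 ih2 => simp [revRT, chainEnts, ih2]

theorem specRun_pushKids (c : Bool) (t : RT) (td : List (RT × Bool)) (off : Int)
    (out : List (Int × Bool × Int × Int)) :
    specRun (pushKids c t td) off out = specRun ((chainEnts c t).reverse ++ td) off out := by
  induction t generalizing td off out with
  | nil => simp [pushKids, chainEnts]
  | node l rc len kids next ih1 ih2 =>
    rw [pushKids, ih2]
    simp only [chainEnts, List.reverse_cons, List.append_assoc]
    rw [specRun_append, specRun_append]
    simp [specRun, detachRT]

theorem cntTd_pushKids (c : Bool) (t : RT) (td : List (RT × Bool)) :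
    cntTd (pushKids c t td) = rtSize t + cntTd td := by
  induction t generalizing td with
  | nil => simp [pushKids, rtSize]
  | node l rc len kids next ih1 ih2 =>
    rw [pushKids, ih2]
    simp [cntTd, detachRT, rtSize]
    omega

theorem pushKids_noNil (c : Bool) (t : RT) (td : List (RT × Bool))
    (h : ∀ p ∈ td, p.1 ≠ RT.nil) : ∀ p ∈ pushKids c t td, p.1 ≠ RT.nil := by
  induction t generalizing td with
  | nil => simpa [pushKids] using h
  | node l rc len kids next ih1 ih2 =>
    rw [pushKids]
    refine ih2 _ ?_
    intro p hp
    rcases List.mem_cons.1 hp with h1 | h1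
    · subst h1; simp
    · exact h p h1

-- travA on a single chain, entry by entry
theorem specRun_chainEnts (t : RT) (c : Bool) (rest : List (RT × Bool)) (off : Int)
    (out : List (Int × Bool × Int × Int)) :
    specRun (chainEnts c t ++ rest) off out =
      specRun rest (travA t c off out).1 (travA t c off out).2 := by
  induction t generalizing rest off out with
  | nil => simp [chainEnts, travA]
  | node l rc len kids next ih1 ih2 =>
    simp only [chainEnts, List.cons_append]
    rw [specRun]
    simp only [detachRT]
    rw [ih2]
    -- both sides first run the node body, then the rest of the chain
    by_cases hk : kids = RT.nil
    · simp [travA, hk]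
    · simp [travA, hk]

theorem cnt_pos_of_node (p : RT × Bool) (h : p.1 ≠ RT.nil) : 1 ≤ rtSize (detachRT p.1) := by
  cases hp : p.1 with
  | nil => exact absurd hp h
  | node l rc len kids next => simp [detachRT, rtSize]

-- main traversal lemma: with enough fuel the iterative walk equals the reference run
theorem todoLoop_spec (f : Nat) :
    ∀ td off out, (∀ p ∈ td, p.1 ≠ RT.nil) → cntTd td ≤ f →
      todoLoop f td off out = specRun td off out := by
  induction f with
  | zero =>
    intro td off out hnil hcnt
    cases td with
    | nil => rfl
    | cons p rest =>
      exfalso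
      have h1 := cnt_pos_of_node p (hnil p (by simp))
      have : 1 ≤ cntTd (p :: rest) := by
        simp [cntTd]; omega
      omega
  | succ f ih =>
    intro td off out hnil hcnt
    cases td with
    | nil => rfl
    | cons p rest =>
      obtain ⟨t, flag⟩ := p
      cases t with
      | nil => exact absurd rfl (hnil (RT.nil, flag) (by simp))
      | node l rc len kids next =>
        have hrest : ∀ p ∈ rest, p.1 ≠ RT.nil := fun p hp => hnil p (by simp [hp])
        have hcnt' : cntTd ((⟨RT.node l rc len kids next, flag⟩ : RT × Bool) :: rest)
            = 1 + rtSize kids + cntTd rest := by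
          simp [cntTd, detachRT, rtSize]
        rw [hcnt'] at hcnt
        by_cases hk : kids = RT.nil
        · rw [todoLoop, specRun]
          simp only [hk, if_pos, detachRT]
          rw [ih rest _ _ hrest (by subst hk; simp [rtSize] at hcnt; omega)]
          simp [travA]
        · have hsz : rtSize (if flag != rc then kids else revRT kids RT.nil) = rtSize kids := by
            split
            · rfl
            · rw [rtSize_revRT]; simp [rtSize]
          rw [todoLoop, specRun]
          simp only [hk, reduceIte]
          rw [ih _ _ _ (pushKids_noNil _ _ _ hrest)
              (by rw [cntTd_pushKids, hsz]; omega)]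
          rw [specRun_pushKids]
          -- the pushed (pre-reversed) chain pops in exactly travA's visiting order
          have hfl : (if flag then (if rc then false else true)
              else (if rc then true else false)) = (flag != rc) := by
            cases flag <;> cases rc <;> rfl
          have hrev : (chainEnts (flag != rc) (if flag != rc then kids
                        else revRT kids RT.nil)).reverse
              = chainEnts (flag != rc) (if (if flag then (if rc then false else true)
                        else (if rc then true else false)) then revRT kids RT.nil else kids) := by
            rw [hfl]
            cases hb : (flag != rc) <;> simp [chainEnts_revRT, chainEnts]
          rw [hrev, specRun_chainEnts]
          simp only [travA, detachRT, hk, reduceIte]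
          rw [hfl]

-- ---------- parse-side lemmas ----------

theorem parseSibs_suffix (f : Nat) :
    ∀ lvl xs, (parseSibs f lvl xs).2 <:+ xs := by
  induction f with
  | zero => intro lvl xs; simp [parseSibs]
  | succ f ih =>
    intro lvl xs
    cases xs with
    | nil => simp [parseSibs]
    | cons e rest =>
      obtain ⟨l, rc, len⟩ := e
      rw [parseSibs]
      split
      · exact ((ih lvl _).trans (ih l rest)).trans (List.suffix_cons _ _)
      · exact List.suffix_rfl

theorem parseSibs_fuel (f : Nat) :
    ∀ g lvl xs, xs.length < f → xs.length < g →
      parseSibs f lvl xs = parseSibs g lvl xs := by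
  induction f with
  | zero => intro g lvl xs h; omega
  | succ f ih =>
    intro g lvl xs hf hg
    cases g with
    | zero => omega
    | succ g =>
      cases xs with
      | nil => rfl
      | cons e rest =>
        obtain ⟨l, rc, len⟩ := e
        simp only [List.length_cons] at hf hg
        rw [parseSibs, parseSibs]
        split
        · have h1 : parseSibs f l rest = parseSibs g l rest := ih g l rest (by omega) (by omega)
          have hlen := (parseSibs_suffix g l rest).length_le
          have h2 : parseSibs f lvl (parseSibs g l rest).2
              = parseSibs g lvl (parseSibs g l rest).2 :=
            ih g lvl _ (by omega) (by omega)
          simp only [h1, h2]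
        · rfl

theorem parseSibs_head (f : Nat) :
    ∀ lvl xs, xs.length < f → ∀ e es, (parseSibs f lvl xs).2 = e :: es → e.1 ≤ lvl := by
  induction f with
  | zero => intro lvl xs h; omega
  | succ f ih =>
    intro lvl xs hf e es hrest
    cases xs with
    | nil => simp [parseSibs] at hrest
    | cons p rest =>
      obtain ⟨l, rc, len⟩ := p
      simp only [List.length_cons] at hf
      rw [parseSibs] at hrest
      split at hrest
      · have hlen := (parseSibs_suffix f l rest).length_le
        exact ih lvl _ (by omega) e es hrest
      · rename_i hcond
        simp only at hrest
        cases hrest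
        simpa using hcond

theorem parseSibs_size (f : Nat) :
    ∀ lvl xs, rtSize (parseSibs f lvl xs).1 + (parseSibs f lvl xs).2.length ≤ xs.length := by
  induction f with
  | zero => intro lvl xs; simp [parseSibs, rtSize]
  | succ f ih =>
    intro lvl xs
    cases xs with
    | nil => simp [parseSibs, rtSize]
    | cons p rest =>
      obtain ⟨l, rc, len⟩ := p
      rw [parseSibs]
      split
      · have h1 := ih l rest
        have h2 := ih lvl (parseSibs f l rest).2
        simp only [rtSize, List.length_cons]
        omega
      · simp [rtSize]

-- canonical (fuel-free) reading of the parse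
def pRef (lvl : Int) (xs : List (Int × Bool × Int)) : RT × List (Int × Bool × Int) :=
  parseSibs (xs.length + 1) lvl xs

def addKids (cur : Int × Bool × Int × RT) (t : RT) : Int × Bool × Int × RT :=
  (cur.1, cur.2.1, cur.2.2.1, appendRT cur.2.2.2 t)

def closeFull (p : (Int × Bool × Int × RT) × List (Int × Bool × Int × RT)) :
    Int × Bool × Int × RT :=
  closeAllA p.1 p.2

-- one build step starting from a closed child = the same step after fusing the child into
-- its parent (the popWhile chains coincide)
theorem popWhileA_skip (lvl : Int) (cur : Int × Bool × Int × RT)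
    (anc : List (Int × Bool × Int × RT)) (h : ¬ lvl ≤ cur.1) :
    popWhileA lvl cur anc = (cur, anc) := by
  cases anc with
  | nil => rfl
  | cons f rest => rw [popWhileA, if_neg h]

theorem buildLoopA_popFuse (cur f : Int × Bool × Int × RT)
    (anc : List (Int × Bool × Int × RT)) (e : Int × Bool × Int)
    (rest : List (Int × Bool × Int)) (h : e.1 ≤ cur.1) :
    buildLoopA cur (f :: anc) (e :: rest) = buildLoopA (frameClose f cur) anc (e :: rest) := by
  obtain ⟨l, rc, len⟩ := e
  simp only at h
  have h1 : cur.1 + 1 ≠ l := by omega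
  rw [buildLoopA, buildLoopA, if_pos h1, popWhileA, if_pos h]
  by_cases h2 : (frameClose f cur).1 + 1 ≠ l
  · rw [if_pos h2]
  · rw [if_neg h2, popWhileA_skip _ _ _ (by omega)]

-- simple chain predicates replacing List.Chain' (each level may rise by at most one)
def stepOk : Int → List Int → Prop
  | _, [] => True
  | a, b :: rest => b ≤ a + 1 ∧ stepOk b rest

def chainTail : List Int → Prop
  | [] => True
  | a :: rest => stepOk a rest

theorem stepOk_chainTail (a : Int) (xs : List Int) (h : stepOk a xs) : chainTail xs := by
  cases xs with
  | nil => trivial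
  | cons b rest => exact h.2

theorem chainTail_suffix (xs : List Int) :
    ∀ ys, ys <:+ xs → chainTail xs → chainTail ys := by
  induction xs with
  | nil => intro ys hs _; rw [List.suffix_nil.1 hs]; trivial
  | cons a rest ih =>
    intro ys hs hc
    obtain ⟨t, ht⟩ := hs
    cases t with
    | nil =>
      have hys : ys = a :: rest := by simpa using ht
      rw [hys]; exact hc
    | cons b t' =>
      have hys : ys <:+ rest := ⟨t', by simpa using congrArg List.tail ht⟩
      exact ih ys hys (stepOk_chainTail a rest hc)

theorem stepOk_of_zip (xs : List Int) :
    ∀ a, (∀ p ∈ (a :: xs).zip xs, p.2 ≤ p.1 + 1) → stepOk a xs := by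
  induction xs with
  | nil => intro a _; trivial
  | cons b rest ih =>
    intro a h
    refine ⟨h (a, b) (by simp [List.zip]), ih b ?_⟩
    intro p hp
    exact h p (by simp [List.zip] at hp ⊢; tauto)

-- the zipper build of A equals the recursive-descent parse of B
theorem buildLoopA_pRef (n : Nat) :
    ∀ xs, xs.length ≤ n → ∀ (cur : Int × Bool × Int × RT) anc,
      stepOk cur.1 (xs.map Prod.fst) →
      closeFull (buildLoopA cur anc xs)
        = closeFull (buildLoopA (addKids cur (pRef cur.1 xs).1) anc (pRef cur.1 xs).2) := by
  induction n with
  | zero =>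
    intro xs hlen cur anc _
    have hx : xs = [] := List.length_eq_zero_iff.1 (by omega)
    subst hx
    simp [pRef, parseSibs, addKids, appendRT_nil]
  | succ n ih =>
    intro xs hlen cur anc hchain
    cases xs with
    | nil => simp [pRef, parseSibs, addKids, appendRT_nil]
    | cons p rest =>
      obtain ⟨l, rc, len⟩ := p
      have hchain2 : l ≤ cur.1 + 1 ∧ stepOk l (rest.map Prod.fst) := hchain
      obtain ⟨hlink, hchain'⟩ := hchain2
      by_cases hlt : cur.1 < l
      · -- l = cur.1 + 1 : attach a new child
        have hl : l = cur.1 + 1 := by omega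
        have hstep : buildLoopA cur anc ((l, rc, len) :: rest)
            = buildLoopA (l, rc, len, RT.nil) (cur :: anc) rest := by
          rw [buildLoopA, if_neg (by omega)]
        have hs := (parseSibs_suffix (rest.length + 1) l rest).length_le
        have e2 : parseSibs (rest.length + 1) cur.1 (parseSibs (rest.length + 1) l rest).2
            = pRef cur.1 (pRef l rest).2 :=
          parseSibs_fuel _ _ _ _ (by omega) (by simp only [pRef]; omega)
        have hfuel : pRef cur.1 ((l, rc, len) :: rest)
            = (RT.node l rc len (pRef l rest).1 (pRef cur.1 (pRef l rest).2).1,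
               (pRef cur.1 (pRef l rest).2).2) := by
          rw [pRef]
          simp only [List.length_cons]
          rw [parseSibs, if_pos hlt]
          simp only [e2]
          rfl
        simp only [List.length_cons] at hlen
        have h1 : closeFull (buildLoopA (l, rc, len, RT.nil) (cur :: anc) rest)
            = closeFull (buildLoopA (l, rc, len, (pRef l rest).1) (cur :: anc)
                (pRef l rest).2) := by
          have h0 := ih rest (by omega) (l, rc, len, RT.nil) (cur :: anc) hchain'
          simpa [addKids, appendRT] using h0
        have hclose : frameClose cur (l, rc, len, (pRef l rest).1)
            = addKids cur (RT.node l rc len (pRef l rest).1 RT.nil) := by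
          simp [frameClose, addKids]
        rw [hstep, h1, hfuel]
        cases hr1 : (pRef l rest).2 with
        | nil =>
          simp only [show pRef cur.1 ([] : List (Int × Bool × Int)) = (RT.nil, []) from rfl]
          simp [buildLoopA, closeFull, closeAllA, hclose]
        | cons e tl =>
          have hehead : e.1 ≤ l :=
            parseSibs_head (rest.length + 1) l rest (by omega) e tl
              (by simpa [pRef] using hr1)
          rw [buildLoopA_popFuse _ _ _ _ _ (by simpa using hehead), hclose]
          have hsuffix : (pRef l rest).2 <:+ rest := parseSibs_suffix _ _ _
          have hct : chainTail ((e :: tl).map Prod.fst) :=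
            chainTail_suffix (rest.map Prod.fst) _
              (by rw [← hr1]; exact hsuffix.map _) (stepOk_chainTail _ _ hchain')
          have hchain1 : stepOk cur.1 ((e :: tl).map Prod.fst) := ⟨by omega, hct⟩
          have hlen1 : (e :: tl).length ≤ rest.length := by
            rw [← hr1]; exact hsuffix.length_le
          have h2 := ih (e :: tl) (by omega)
            (addKids cur (RT.node l rc len (pRef l rest).1 RT.nil)) anc hchain1
          rw [h2]
          simp [addKids, appendRT_assoc, appendRT]
      · -- l ≤ cur.1 : the parse consumes nothing and the claim is trivial
        have hnone : pRef cur.1 ((l, rc, len) :: rest) = (RT.nil, (l, rc, len) :: rest) := by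
          rw [pRef, parseSibs, if_neg hlt]
        rw [hnone]
        simp [addKids, appendRT_nil]

-- full consumption under Pre_: every level above lvl means nothing is left over
theorem pRef_rest_nil (lvl : Int) (xs : List (Int × Bool × Int))
    (h : ∀ e ∈ xs, lvl < e.1) : (pRef lvl xs).2 = [] := by
  cases hr : (pRef lvl xs).2 with
  | nil => rfl
  | cons e tl =>
    exfalso
    have hmem : e ∈ xs := (parseSibs_suffix _ _ _).subset (by rw [pRef] at hr; rw [hr]; simp)
    have := parseSibs_head (xs.length + 1) lvl xs (by omega) e tl (by rw [pRef] at hr; exact hr)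
    have := h e hmem
    omega

-- ===== VERDICT (by name: the statement is the Claim_ definition above) =====
theorem process_mtree_spec : Claim_equal_process_mtree := by
  intro mtree _ hpre
  unfold Spec_process_mtree
  obtain ⟨hchain, hhead⟩ := hpre
  cases mtree with
  | nil => rfl
  | cons p rest =>
    obtain ⟨l0, rc0, len0⟩ := p
    have hhead' : ∀ e ∈ rest, l0 < e.1 := by
      intro e he
      simpa using hhead (l0, rc0, len0) (by simp) e (by simpa using he)
    -- A side: build = parse
    have hstep0 : stepOk l0 (rest.map Prod.fst) := by
      refine stepOk_of_zip _ _ ?_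
      intro q hq
      exact hchain q (by simpa using hq)
    have hbuild := buildLoopA_pRef rest.length rest le_rfl (l0, rc0, len0, RT.nil) []
      (by exact hstep0)
    have hrestnil : (pRef l0 rest).2 = [] := pRef_rest_nil l0 rest hhead'
    rw [hrestnil] at hbuild
    have hA : closeFull (buildLoopA (l0, rc0, len0, RT.nil) [] rest)
        = (l0, rc0, len0, (pRef l0 rest).1) := by
      rw [hbuild]
      simp [buildLoopA, closeFull, closeAllA, addKids, appendRT]
    -- B side: iterative walk = recursive traverse
    have hkidsB : (parseSibs ((l0, rc0, len0) :: rest).length l0 rest).1 = (pRef l0 rest).1 := by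
      rw [pRef]; simp
    have hsize := parseSibs_size (rest.length + 1) l0 rest
    have hcnt : cntTd [(RT.node l0 rc0 len0 (pRef l0 rest).1 RT.nil, false)]
        ≤ ((l0, rc0, len0) :: rest).length := by
      simp only [cntTd, List.map_cons, List.map_nil, List.sum_cons, List.sum_nil,
        detachRT, rtSize, List.length_cons]
      rw [pRef] at *
      omega
    have hB := todoLoop_spec ((l0, rc0, len0) :: rest).length
      [(RT.node l0 rc0 len0 (pRef l0 rest).1 RT.nil, false)] 0 []
      (by intro p hp; simp at hp; rw [hp]; simp) hcnt
    show _ = process_mtree_alt _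
    rw [process_mtree_alt]
    simp only [hkidsB]
    rw [hB]
    rw [process_mtree]
    have hA' : closeAllA (buildLoopA (l0, rc0, len0, RT.nil) [] rest).1
        (buildLoopA (l0, rc0, len0, RT.nil) [] rest).2 = (l0, rc0, len0, (pRef l0 rest).1) := hA
    simp only [hA']
    simp [specRun, detachRT]
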